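-- pv_equiv track=rewrite | github.com/mhmulder/image_captioning | src/get_information_step_2/information_call.py | segment_and_concat_id_list_for_api
-- ===== SOURCE A (Python) =====
-- def segment_and_concat_id_list_for_api(id_list, segment_num=20):
--     """
--     Segments the ID list into the segment_num, which is defaulted to 20, per
--     the limittions on the websites API.It then concatenates them into strings
--     for use in the API
--
--     paramters:
--     --------------------------
--     id_list (list) -> A python list containing the product ID's for all
--     elements.
--
--     segment_num (int) -> The number of unique ID's that can be passed per
--     call to the API.
--
--     returns:
--     --------------------------
--     concat_ids_for_api (list of strings) -> A list of concatenated ID's that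
--     can be passed to the API.
--     """
--     concat_ids_for_api = []
--     if len(id_list) % segment_num == 0:
--         end = int(len(id_list)/segment_num)
--     else:
--         end = int(len(id_list)/segment_num + 1)
--     segmented_ids = []
--     for i in range(0, end):
--         if i == (end - 1):
--             segmented_ids.append(id_list[i*segment_num:])
--         else:
--             segmented_ids.append(
--                           id_list[i*segment_num:i*segment_num+segment_num])
--     for segment in segmented_ids:
--         concat_ids_for_api.append(",".join(segment))
--     return concat_ids_for_api
-- ===== SOURCE B (Python) =====
-- def segment_and_concat_id_list_for_api(id_list, segment_num=20):
--     """Single pass over the ids with a running buffer: flush a joined chunk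
--     whenever the buffer reaches segment_num, then flush the remainder."""
--     concat_ids_for_api = []
--     buf = []
--     for pid in id_list:
--         buf.append(pid)
--         if len(buf) == segment_num:
--             concat_ids_for_api.append(",".join(buf))
--             buf = []
--     if buf:
--         concat_ids_for_api.append(",".join(buf))
--     return concat_ids_for_api
-- ===== Notes on version B (the rewrite author's own statement) =====
-- stated objective: simpler
-- what changed: B makes one element-wise pass with a running buffer that is flushed every segment_num ids, instead of precomputing the chunk count with %/division and slicing by chunk index in two loops.
-- outside the precondition, e.g. on segment_and_concat_id_list_for_api(['a', 'b', 'c'], -2): A returns [], B returns ['a,b,c']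
import Mathlib
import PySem

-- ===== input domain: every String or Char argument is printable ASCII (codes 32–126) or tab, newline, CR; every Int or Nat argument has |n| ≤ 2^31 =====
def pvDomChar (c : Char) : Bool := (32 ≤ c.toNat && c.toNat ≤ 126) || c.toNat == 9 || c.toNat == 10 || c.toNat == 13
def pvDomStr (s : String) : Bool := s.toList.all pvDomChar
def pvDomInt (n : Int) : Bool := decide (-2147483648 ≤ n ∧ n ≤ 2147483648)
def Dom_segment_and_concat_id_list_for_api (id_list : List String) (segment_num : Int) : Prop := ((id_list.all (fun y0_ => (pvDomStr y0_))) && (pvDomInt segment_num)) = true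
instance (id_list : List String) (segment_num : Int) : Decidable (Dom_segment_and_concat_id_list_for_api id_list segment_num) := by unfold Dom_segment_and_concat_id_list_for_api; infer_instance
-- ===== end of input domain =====

-- B replaces A's chunk-count-and-slice scheme by a single running-buffer pass; objective: simpler.


-- ===== PORT A =====
-- int(len/seg) and int(len/seg + 1) are ported as floor division: exact on the
-- admitted domain (nonnegative length, positive segment_num, |values| ≤ 2^31).
def segment_and_concat_id_list_for_api (id_list : List String) (segment_num : Int) : List String :=
  let n : Int := id_list.length
  let endi : Int :=
    if PySem.Int.mod n segment_num = 0 then PySem.Int.floordiv n segment_num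
    else PySem.Int.floordiv n segment_num + 1
  let segmented_ids : List (List String) :=
    (PySem.List.pyRange 0 endi 1).foldl (fun acc i =>
      if i = endi - 1 then
        acc ++ [PySem.List.slice id_list (some (i * segment_num)) none]
      else
        acc ++ [PySem.List.slice id_list (some (i * segment_num)) (some (i * segment_num + segment_num))]) []
  segmented_ids.foldl (fun acc seg => acc ++ [PySem.Str.join "," seg]) []

-- ===== PORT B =====
-- the running-buffer loop of Source B: res = flushed chunks, buf = current chunk
def pvGoB (seg : Int) : List String → List String → List String → List String
  | res, buf, [] => if buf = [] then res else res ++ [PySem.Str.join "," buf]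
  | res, buf, x :: xs =>
      let buf' := buf ++ [x]
      if (buf'.length : Int) = seg then pvGoB seg (res ++ [PySem.Str.join "," buf']) [] xs
      else pvGoB seg res buf' xs

def segment_and_concat_id_list_for_api_alt (id_list : List String) (segment_num : Int) : List String :=
  pvGoB segment_num [] [] id_list

-- ===== PRECONDITION & SPEC =====
-- Pre_ restricts to positive segment_num, the function's natural domain: A raises
-- ZeroDivisionError at segment_num = 0, and for negative segment_num it returns an
-- empty list regardless of the ids — a degenerate artefact of the truncating division —
-- while B's running-buffer algorithm naturally emits the ids there.
def Pre_segment_and_concat_id_list_for_api (id_list : List String) (segment_num : Int) : Prop :=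
  0 < segment_num
instance (id_list : List String) (segment_num : Int) : Decidable (Pre_segment_and_concat_id_list_for_api id_list segment_num) := by unfold Pre_segment_and_concat_id_list_for_api; infer_instance
def pvWitness_segment_and_concat_id_list_for_api : List String × Int := (["a", "b", "c"], 2)

def Spec_segment_and_concat_id_list_for_api (id_list : List String) (segment_num : Int) (out : List String) : Prop := out = segment_and_concat_id_list_for_api_alt id_list segment_num
instance (id_list : List String) (segment_num : Int) (out : List String) : Decidable (Spec_segment_and_concat_id_list_for_api id_list segment_num out) := by unfold Spec_segment_and_concat_id_list_for_api; infer_instance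

-- ===== CLAIM (what is proved, stated in full; the proofs are below) =====
def Claim_equal_segment_and_concat_id_list_for_api : Prop := ∀ (id_list : List String) (segment_num : Int), Dom_segment_and_concat_id_list_for_api id_list segment_num → Pre_segment_and_concat_id_list_for_api id_list segment_num → Spec_segment_and_concat_id_list_for_api id_list segment_num (segment_and_concat_id_list_for_api id_list segment_num)

-- ===== LEMMAS AND PROOFS =====

-- common specification: the list of chunks of size s (s > 0 in all uses)
def pvChunks (s : Nat) : List String → List (List String)
  | [] => []
  | x :: xs => (x :: xs.take (s - 1)) :: pvChunks s (xs.drop (s - 1))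
termination_by l => l.length
decreasing_by simp

theorem pvChunks_nil (s : Nat) : pvChunks s [] = [] := by rw [pvChunks]

theorem pvChunks_cons' (s : Nat) (x : String) (xs : List String) :
    pvChunks s (x :: xs) = (x :: xs.take (s - 1)) :: pvChunks s (xs.drop (s - 1)) := by
  rw [pvChunks]

theorem pvChunks_cons (s : Nat) (hs : 0 < s) (l : List String) (hl : l ≠ []) :
    pvChunks s l = l.take s :: pvChunks s (l.drop s) := by
  cases l with
  | nil => exact absurd rfl hl
  | cons x xs =>
    obtain ⟨t, rfl⟩ : ∃ t, s = t + 1 := ⟨s - 1, by omega⟩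
    rw [pvChunks_cons']
    simp

-- the chunk count A computes
def pvEnd (s n : Nat) : Nat := if n % s = 0 then n / s else n / s + 1

theorem pvEnd_succ (s n : Nat) (hs : 0 < s) (hn : 0 < n) :
    pvEnd s n = pvEnd s (n - s) + 1 := by
  unfold pvEnd
  rcases Nat.lt_or_ge s n with h | h
  · have h1 : n % s = (n - s) % s := by
      conv_lhs => rw [show n = s + (n - s) by omega]
      exact Nat.add_mod_left s (n - s)
    have h2 : n / s = (n - s) / s + 1 := by
      conv_lhs => rw [show n = (n - s) + s by omega]
      exact Nat.add_div_right _ hs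
    rw [h1, h2]; split_ifs <;> omega
  · rcases Nat.eq_or_lt_of_le h with rfl | h'
    · simp [Nat.div_self hs]
    · rw [Nat.mod_eq_of_lt h', Nat.div_eq_of_lt h', if_neg (by omega),
          Nat.sub_eq_zero_of_le (le_of_lt h')]
      simp

theorem pvLen_le (s n : Nat) (hs : 0 < s) : n ≤ pvEnd s n * s := by
  unfold pvEnd
  have h1 := Nat.div_add_mod n s
  have h2 := Nat.mod_lt n hs
  split_ifs with h <;> nlinarith [Nat.div_mul_le_self n s]

theorem pvChunks_eq_map (s : Nat) (hs : 0 < s) (l : List String) :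
    pvChunks s l = (List.range (pvEnd s l.length)).map (fun i => (l.drop (i * s)).take s) := by
  induction hn : l.length using Nat.strong_induction_on generalizing l with
  | _ n ih =>
    cases l with
    | nil => simp [pvChunks_nil, pvEnd, ← hn]
    | cons x xs =>
      subst hn
      rw [pvChunks_cons s hs _ (by simp)]
      have hlen : (List.drop s (x :: xs)).length = (x :: xs).length - s := by simp
      rw [ih ((x :: xs).length - s) (by simp; omega) _ hlen,
          pvEnd_succ s (x :: xs).length hs (by simp), List.range_succ_eq_map]
      simp only [List.map_cons, List.map_map]
      congr 1
      · simp
      · apply List.map_congr_left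
        intro i _
        simp only [Function.comp_apply, List.drop_drop, Nat.succ_mul]
        rw [Nat.add_comm]

-- turn A's append-fold into a map
theorem pvFoldl_app {α β : Type} (f : α → β) (L : List α) (acc : List β) :
    L.foldl (fun a i => a ++ [f i]) acc = acc ++ L.map f := by
  induction L generalizing acc with
  | nil => simp
  | cons x xs ih => simp [List.foldl_cons, ih]

theorem pvA_eq (l : List String) (s : Nat) (hs : 0 < s) :
    segment_and_concat_id_list_for_api l (s : Int) =
      (pvChunks s l).map (PySem.Str.join ",") := by
  unfold segment_and_concat_id_list_for_api
  simp only [PySem.Int.mod_natCast, PySem.Int.floordiv_natCast]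
  rw [pvFoldl_app]
  have hendi : (if ((l.length % s : Nat) : Int) = 0 then ((l.length / s : Nat) : Int)
      else ((l.length / s : Nat) : Int) + 1) = ((pvEnd s l.length : Nat) : Int) := by
    unfold pvEnd; split_ifs <;> push_cast <;> omega
  rw [hendi]
  have hif : ∀ (acc : List (List String)) (i : Int),
      (if i = ((pvEnd s l.length : Nat) : Int) - 1 then
        acc ++ [PySem.List.slice l (some (i * (s : Int))) none]
      else
        acc ++ [PySem.List.slice l (some (i * (s : Int))) (some (i * (s : Int) + (s : Int)))]) =
      acc ++ [if i = ((pvEnd s l.length : Nat) : Int) - 1 then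
        PySem.List.slice l (some (i * (s : Int))) none
      else PySem.List.slice l (some (i * (s : Int))) (some (i * (s : Int) + (s : Int)))] := by
    intro acc i; split_ifs <;> rfl
  simp only [hif]
  rw [pvFoldl_app, pvChunks_eq_map s hs l, List.map_map, PySem.List.pyRange_one]
  simp only [Int.sub_zero, Int.toNat_natCast, List.map_map, List.nil_append]
  apply List.map_congr_left
  intro k hk
  simp only [Function.comp_apply, Int.zero_add]
  have hk' : k < pvEnd s l.length := List.mem_range.mp hk
  have hpos : 0 < pvEnd s l.length := by omega
  by_cases hlast : k = pvEnd s l.length - 1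
  · rw [if_pos (by omega)]
    subst hlast
    rw [show ((pvEnd s l.length - 1 : Nat) : Int) * (s : Int) = (((pvEnd s l.length - 1) * s : Nat) : Int) by push_cast; ring,
        PySem.List.slice_from_natCast]
    congr 1
    refine (List.take_of_length_le ?_).symm
    have hb := pvLen_le s l.length hs
    have hmul : (pvEnd s l.length - 1) * s + s = pvEnd s l.length * s := by
      obtain ⟨m, hm⟩ : ∃ m, pvEnd s l.length = m + 1 := ⟨pvEnd s l.length - 1, by omega⟩
      rw [hm]
      simp [Nat.succ_mul]
    simp
    omega
  · rw [if_neg (by omega)]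
    rw [show ((k : Int)) * (s : Int) = ((k * s : Nat) : Int) by push_cast; ring,
        show ((k * s : Nat) : Int) + (s : Int) = ((k * s : Nat) : Int) + ((s : Nat) : Int) by norm_num,
        PySem.List.slice_natCast_add]

theorem pvGoB_prefix (seg : Int) (res buf xs : List String) :
    pvGoB seg res buf xs = res ++ pvGoB seg [] buf xs := by
  induction xs generalizing res buf with
  | nil => simp [pvGoB]; split_ifs <;> simp
  | cons x xs ih =>
    simp only [pvGoB]
    split_ifs with h
    · rw [ih, ih ([] ++ [PySem.Str.join "," (buf ++ [x])]) []]; simp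
    · exact ih res (buf ++ [x])

theorem pvB_eq (s : Nat) (hs : 0 < s) (buf xs : List String) (hbuf : buf.length < s) :
    pvGoB (s : Int) [] buf xs = (pvChunks s (buf ++ xs)).map (PySem.Str.join ",") := by
  induction xs generalizing buf with
  | nil =>
    simp only [pvGoB, List.append_nil]
    cases buf with
    | nil => simp [pvChunks_nil]
    | cons b bs =>
      rw [if_neg (by simp)]
      rw [pvChunks_cons' s b bs,
          List.take_of_length_le (by simp at hbuf ⊢; omega),
          List.drop_eq_nil_of_le (by simp at hbuf ⊢; omega), pvChunks_nil]
      simp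
  | cons x xs ih =>
    simp only [pvGoB]
    have hx : buf ++ x :: xs = (buf ++ [x]) ++ xs := by simp
    split_ifs with h
    · have hlen : (buf ++ [x]).length = s := by exact_mod_cast h
      have htake : ((buf ++ [x]) ++ xs).take s = buf ++ [x] := by
        rw [← hlen]; exact List.take_left
      have hdrop : ((buf ++ [x]) ++ xs).drop s = xs := by
        rw [← hlen]; exact List.drop_left
      rw [pvGoB_prefix, ih [] (by simpa using hs), hx,
          pvChunks_cons s hs _ ((by simp : (buf ++ [x]) ++ xs ≠ [])),
          htake, hdrop]
      simp
    · have hlen : (buf ++ [x]).length < s := by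
        have h' : ((buf ++ [x]).length : Int) ≠ (s : Int) := h
        simp at h' ⊢
        omega
      rw [ih _ hlen, hx]

-- ===== VERDICT (by name: the statement is the Claim_ definition above) =====
theorem segment_and_concat_id_list_for_api_spec : Claim_equal_segment_and_concat_id_list_for_api := by
  intro id_list segment_num _ hpre
  have hp : 0 < segment_num := hpre
  unfold Spec_segment_and_concat_id_list_for_api segment_and_concat_id_list_for_api_alt
  have hs : 0 < segment_num.toNat := by omega
  have hcast : (segment_num.toNat : Int) = segment_num := Int.toNat_of_nonneg (le_of_lt hp)
  rw [← hcast, pvA_eq id_list segment_num.toNat hs,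
      pvB_eq segment_num.toNat hs [] id_list (by simpa using hs)]
  simp
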